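-- pv_equiv track=rewrite | github.com/whitemech/Plan4Past | benchmark/utils/triangletireworld.py | generate_formula_triangletireworld
-- ===== SOURCE A (Python) =====
-- def _locs_goal_order_zigzag(nb_locs: int):
--     assert nb_locs >= 2
--     result = []
--     i = 1
--     j = 1
--     while i + j <= nb_locs + 1:
--         result.append(f"l{i}x{j}")
--         if i == j:
--             i += 1
--         elif i - j == 1:
--             j += 1
--     return result
--
-- def generate_formula_triangletireworld(nb_locs: int):
--     """Generate formula from number of locations of a triangle side."""
--     assert nb_locs >= 2
--     order = list(_locs_goal_order_zigzag(nb_locs))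
--     formula = f"vehicleat_{order[0]}"
--     for i in range(1, len(order)):
--         formula = f"vehicleat_{order[i]} & Y(O({formula}))"
--     formula = f"O({formula})"
--     return formula
-- ===== SOURCE B (Python) =====
-- def generate_formula_triangletireworld(nb_locs: int):
--     """Generate formula from number of locations of a triangle side."""
--     assert nb_locs >= 2
--     # closed-form zigzag: k-th location (1-indexed) directly from k's parity
--     order = [
--         f"l{(k + 1) // 2}x{(k + 1) // 2}" if k % 2 else f"l{k // 2 + 1}x{k // 2}"
--         for k in range(1, nb_locs + 1)
--     ]
--     return (
--         "O("
--         + " & Y(O(".join("vehicleat_" + loc for loc in reversed(order))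
--         + "))" * (nb_locs - 1)
--         + ")"
--     )
-- ===== Notes on version B (the rewrite author's own statement) =====
-- stated objective: simpler
-- what changed: Replaces the stateful (i,j) zigzag while-loop and the incremental formula-rebuilding loop by a closed-form parity formula for the k-th location plus a single join over the reversed order with multiplied closing parentheses.
import Mathlib
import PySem

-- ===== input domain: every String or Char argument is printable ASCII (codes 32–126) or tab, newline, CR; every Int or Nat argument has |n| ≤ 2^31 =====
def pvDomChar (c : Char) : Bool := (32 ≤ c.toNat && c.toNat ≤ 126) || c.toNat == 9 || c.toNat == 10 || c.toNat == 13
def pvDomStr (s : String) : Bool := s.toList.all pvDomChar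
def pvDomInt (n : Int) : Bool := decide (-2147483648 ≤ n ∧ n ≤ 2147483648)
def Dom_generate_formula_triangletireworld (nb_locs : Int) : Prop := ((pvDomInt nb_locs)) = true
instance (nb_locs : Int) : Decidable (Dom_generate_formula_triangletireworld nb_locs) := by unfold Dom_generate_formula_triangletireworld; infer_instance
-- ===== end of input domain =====

-- B replaces A's stateful (i,j) zigzag while-loop and incremental formula rebuilding by a
-- closed-form parity formula for the k-th location plus one join over the reversed order
-- with repeated closing parentheses (objective: simpler).


-- ===== PORT A =====
-- the while-loop of _locs_goal_order_zigzag; fuel (nb_locs+1).toNat only makes the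
-- recursion total, it is never exhausted on the states the Python loop reaches
def pvZigzagA (nb : Int) : Nat → Int → Int → List String
  | 0, _, _ => []
  | fuel + 1, i, j =>
    if i + j ≤ nb + 1 then
      ("l" ++ PySem.Int.toStr i ++ "x" ++ PySem.Int.toStr j) ::
        (if i = j then pvZigzagA nb fuel (i + 1) j
         else if i - j = 1 then pvZigzagA nb fuel i (j + 1)
         else pvZigzagA nb fuel i j)
    else []

def generate_formula_triangletireworld (nb_locs : Int) : String :=
  -- assert nb_locs >= 2 : AssertionError for nb_locs < 2, excluded by Pre_
  let order := pvZigzagA nb_locs (nb_locs + 1).toNat 1 1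
  -- order[0] cannot raise under Pre_ (order is nonempty); pyGetD's default is never used
  let formula := "vehicleat_" ++ PySem.List.pyGetD order 0 ""
  let formula := (PySem.List.pyRange 1 (order.length : Int) 1).foldl
      (fun formula i => "vehicleat_" ++ PySem.List.pyGetD order i "" ++ " & Y(O(" ++ formula ++ "))") formula
  "O(" ++ formula ++ ")"

-- ===== PORT B =====
-- the comprehension's per-element expression (k odd / k even)
def pvLocTerm (k : Int) : String :=
  if PySem.Int.mod k 2 ≠ 0 then
    "l" ++ PySem.Int.toStr (PySem.Int.floordiv (k + 1) 2) ++ "x" ++ PySem.Int.toStr (PySem.Int.floordiv (k + 1) 2)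
  else
    "l" ++ PySem.Int.toStr (PySem.Int.floordiv k 2 + 1) ++ "x" ++ PySem.Int.toStr (PySem.Int.floordiv k 2)

-- exact hand port of Python's s * n for n ≤ given count (negative n gives "")
def pvStrMul (s : String) : Nat → String
  | 0 => ""
  | n + 1 => pvStrMul s n ++ s

def generate_formula_triangletireworld_alt (nb_locs : Int) : String :=
  -- assert nb_locs >= 2 : AssertionError for nb_locs < 2, excluded by Pre_
  let order := (PySem.List.pyRange 1 (nb_locs + 1) 1).map pvLocTerm
  "O(" ++ PySem.Str.join " & Y(O(" (order.reverse.map (fun loc => "vehicleat_" ++ loc))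
    ++ pvStrMul "))" (nb_locs - 1).toNat ++ ")"

-- ===== PRECONDITION & SPEC =====
-- Pre_ excludes exactly nb_locs < 2, where both Pythons raise AssertionError
def Pre_generate_formula_triangletireworld (nb_locs : Int) : Prop := 2 ≤ nb_locs
instance (nb_locs : Int) : Decidable (Pre_generate_formula_triangletireworld nb_locs) := by unfold Pre_generate_formula_triangletireworld; infer_instance
def pvWitness_generate_formula_triangletireworld : Int := (2)

def Spec_generate_formula_triangletireworld (nb_locs : Int) (out : String) : Prop := out = generate_formula_triangletireworld_alt nb_locs
instance (nb_locs : Int) (out : String) : Decidable (Spec_generate_formula_triangletireworld nb_locs out) := by unfold Spec_generate_formula_triangletireworld; infer_instance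

-- ===== CLAIM (what is proved, stated in full; the proofs are below) =====
def Claim_equal_generate_formula_triangletireworld : Prop := ∀ (nb_locs : Int), Dom_generate_formula_triangletireworld nb_locs → Pre_generate_formula_triangletireworld nb_locs → Spec_generate_formula_triangletireworld nb_locs (generate_formula_triangletireworld nb_locs)

-- ===== LEMMAS AND PROOFS =====

theorem pvStrJoin_cons_cons (sep p q : String) (rest : List String) :
    PySem.Str.join sep (p :: q :: rest) = p ++ sep ++ PySem.Str.join sep (q :: rest) := by
  apply String.toList_inj.mp
  simp [PySem.Str.toList_join, PySem.Chars.join_cons_cons]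

theorem pvStrJoin_singleton (sep p : String) : PySem.Str.join sep [p] = p := by
  apply String.toList_inj.mp
  simp [PySem.Str.toList_join, PySem.Chars.join_singleton]

theorem pvStrJoin_cons_ne (sep p : String) (l : List String) (h : l ≠ []) :
    PySem.Str.join sep (p :: l) = p ++ sep ++ PySem.Str.join sep l := by
  cases l with
  | nil => exact absurd rfl h
  | cons q r => exact pvStrJoin_cons_cons sep p q r

-- A's index-loop state machine equals the closed-form map over the index range
theorem pvZigzag_eq (nb : Int) : ∀ (fuel : Nat) (i j : Int), 1 ≤ j → (i = j ∨ i = j + 1) →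
    nb + 2 - (i + j) ≤ (fuel : Int) →
    pvZigzagA nb fuel i j = (PySem.List.pyRange (i + j - 1) (nb + 1) 1).map pvLocTerm := by
  intro fuel
  induction fuel with
  | zero =>
    intro i j _ _ hf
    rw [PySem.List.pyRange_one_eq_nil (by omega)]
    simp [pvZigzagA]
  | succ fuel ih =>
    intro i j hj hij hf
    by_cases h : i + j ≤ nb + 1
    · rw [PySem.List.pyRange_one_cons (by omega : i + j - 1 < nb + 1)]
      simp only [pvZigzagA, if_pos h, List.map_cons]
      rcases hij with rfl | rfl
      · congr 1
        · -- head, j = i : odd index 2j-1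
          unfold pvLocTerm
          have hm : PySem.Int.mod (i + i - 1) 2 = 1 := by
            rw [PySem.Int.mod_eq_emod_of_pos (by norm_num)]; omega
          have hd : PySem.Int.floordiv (i + i - 1 + 1) 2 = i := by
            rw [PySem.Int.floordiv_eq_ediv_of_pos (by norm_num)]
            have : i + i - 1 + 1 = 2 * i := by ring
            rw [this]; exact Int.mul_ediv_cancel_left i (by norm_num)
          rw [if_pos (by rw [hm]; norm_num), hd]
        · rw [if_pos rfl]
          have := ih (i + 1) i hj (Or.inr rfl) (by omega)
          rw [show i + i - 1 + 1 = i + 1 + i - 1 by ring]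
          exact this
      · congr 1
        · -- head, i = j + 1 : even index 2j
          unfold pvLocTerm
          have hm : PySem.Int.mod (j + 1 + j - 1) 2 = 0 := by
            rw [PySem.Int.mod_eq_emod_of_pos (by norm_num)]; omega
          have hd : PySem.Int.floordiv (j + 1 + j - 1) 2 = j := by
            rw [PySem.Int.floordiv_eq_ediv_of_pos (by norm_num)]
            have : j + 1 + j - 1 = 2 * j := by ring
            rw [this]; exact Int.mul_ediv_cancel_left j (by norm_num)
          rw [if_neg (by rw [hm]; norm_num), hd]
        · rw [if_neg (by omega), if_pos (by omega)]
          have := ih (j + 1) (j + 1) (by omega) (Or.inl rfl) (by omega)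
          rw [show j + 1 + j - 1 + 1 = j + 1 + (j + 1) - 1 by ring]
          exact this
    · rw [PySem.List.pyRange_one_eq_nil (by omega)]
      simp [pvZigzagA, h]

-- the incremental rebuilding loop equals the reversed join plus repeated "))"
theorem pvFold_eq_join (xs : List String) (x : String) :
    xs.foldl (fun formula s => "vehicleat_" ++ s ++ " & Y(O(" ++ formula ++ "))") ("vehicleat_" ++ x)
      = PySem.Str.join " & Y(O(" ((x :: xs).reverse.map (fun loc => "vehicleat_" ++ loc))
          ++ pvStrMul "))" xs.length := by
  induction xs using List.reverseRecOn with
  | nil => simp [pvStrMul, pvStrJoin_singleton]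
  | append_singleton ys y ih =>
    rw [List.foldl_append]
    simp only [List.foldl_cons, List.foldl_nil, ih]
    have hrev : (x :: (ys ++ [y])).reverse = y :: (x :: ys).reverse := by simp
    rw [hrev, List.map_cons,
      pvStrJoin_cons_ne _ _ _ (by simp),
      show (ys ++ [y]).length = ys.length + 1 by simp]
    simp only [pvStrMul]
    simp [String.append_assoc]

theorem pvGetD_zero {α : Type} (a : α) (l : List α) (d : α) :
    PySem.List.pyGetD (a :: l) 0 d = a := by
  simp [PySem.List.pyGetD, PySem.List.pyGet?, PySem.List.pyIdx?]

-- ===== VERDICT (by name: the statement is the Claim_ definition above) =====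
theorem generate_formula_triangletireworld_spec : Claim_equal_generate_formula_triangletireworld := by
  intro nb _ hpre
  unfold Spec_generate_formula_triangletireworld
  unfold generate_formula_triangletireworld generate_formula_triangletireworld_alt
  have hpre' : (2 : Int) ≤ nb := hpre
  have horder : pvZigzagA nb (nb + 1).toNat 1 1
      = (PySem.List.pyRange 1 (nb + 1) 1).map pvLocTerm := by
    have := pvZigzag_eq nb (nb + 1).toNat 1 1 (by omega) (Or.inl rfl) (by omega)
    simpa using this
  rw [horder]
  have hcons : PySem.List.pyRange 1 (nb + 1) 1 = 1 :: PySem.List.pyRange 2 (nb + 1) 1 := by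
    have := PySem.List.pyRange_one_cons (by omega : (1 : Int) < nb + 1)
    simpa using this
  rw [hcons]
  simp only [List.map_cons]
  rw [pvGetD_zero]
  rw [PySem.List.foldl_pyRange_pyGetD'
      (pvLocTerm 1 :: (PySem.List.pyRange 2 (nb + 1) 1).map pvLocTerm) ""
      (fun formula s => "vehicleat_" ++ s ++ " & Y(O(" ++ formula ++ "))")
      ("vehicleat_" ++ pvLocTerm 1) (by norm_num)]
  simp only [Int.toNat_one, List.drop_succ_cons, List.drop_zero]
  rw [pvFold_eq_join]
  have hlen : ((PySem.List.pyRange 2 (nb + 1) 1).map pvLocTerm).length = (nb - 1).toNat := by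
    rw [List.length_map, PySem.List.length_pyRange_one]
    omega
  rw [hlen]
  simp [String.append_assoc]
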